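-- pv_equiv track=rewrite | github.com/Yair5675/compress-py | transformations/suffix_arr.py | get_suffixes_types
-- ===== SOURCE A (Python) =====
-- from enum import Enum
-- from typing import Union
--
-- class SuffixType(str, Enum):
--     """
--     An enum containing the two types of a suffix: S-type or L-type.
--     S-type suffixes are lexicographically smaller than the suffixes to their right.
--     L-type suffixes are lexicographically larger than the suffixes to their right.
--     Empty suffixes are defined as S-type.
--     """
--     L = "L"
--     S = "S"
--
--     def __repr__(self):
--         return self.value
--
-- def get_suffixes_types(data: Union[list[int], bytes]) -> list[SuffixType]:
--     """
--     Given a data block, the function returns the suffix type of every suffix of the data.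
--     The types are returned as a list where the ith element is the suffix type of the suffix that starts at index i in
--     the data.
--     The length of the returned list will be len(data) + 1, to include the empty suffix.
--     :param data: The data from which the suffix types will be extracted.
--     :return: A list where the ith element is the suffix type of the suffix that starts at index i in the data.
--     """
--     # Initialize the list, default state will be S-Type:
--     N = len(data)
--     suffixes_types: list[SuffixType] = [SuffixType.S] * (N + 1)  # Empty suffix is always S-type
--
--     # If the data is empty, early return:
--     if N == 0:
--         return suffixes_types
--
--     # Since the empty suffix is defined as S-Type, the suffix containing the last byte is always L-type:
--     suffixes_types[-2] = SuffixType.L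
--
--     # Compute the types backwards:
--     for offset in range(N - 2, -1, -1):
--         # If the current suffix starts with a character lexicographically larger, it's an L type:
--         if data[offset] > data[offset + 1]:
--             suffixes_types[offset] = SuffixType.L
--         # If the two suffixes start with the same character, the current suffix's type will equal the next suffix's:
--         elif data[offset] == data[offset + 1]:
--             suffixes_types[offset] = suffixes_types[offset + 1]
--     return suffixes_types
-- ===== SOURCE B (Python) =====
-- from enum import Enum
-- from typing import Union
--
-- class SuffixType(str, Enum):
--     L = "L"
--     S = "S"
--
--     def __repr__(self):
--         return self.value
--
-- def get_suffixes_types(data: Union[list, bytes]) -> list: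
--     # Forward pass over maximal runs of equal characters: the whole run gets
--     # S if its character is smaller than the next differing character, else L
--     # (a run that reaches the end of the data is L). Empty suffix appended as S.
--     N = len(data)
--     res = []
--     i = 0
--     while i < N:
--         j = i
--         while j + 1 < N and data[j + 1] == data[i]:
--             j += 1
--         if j + 1 < N and data[i] < data[j + 1]:
--             t = SuffixType.S
--         else:
--             t = SuffixType.L
--         res.extend([t] * (j + 1 - i))
--         i = j + 1
--     res.append(SuffixType.S)
--     return res
-- ===== Notes on version B (the rewrite author's own statement) =====
-- stated objective: alternative
-- what changed: Replaces the backward per-index scan that propagates the next suffix's type into each equal position with a forward pass over maximal runs of equal characters, classifying each whole run at once by comparing its character with the next differing character (runs reaching the end are L) and bulk-filling the run.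
import Mathlib
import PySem

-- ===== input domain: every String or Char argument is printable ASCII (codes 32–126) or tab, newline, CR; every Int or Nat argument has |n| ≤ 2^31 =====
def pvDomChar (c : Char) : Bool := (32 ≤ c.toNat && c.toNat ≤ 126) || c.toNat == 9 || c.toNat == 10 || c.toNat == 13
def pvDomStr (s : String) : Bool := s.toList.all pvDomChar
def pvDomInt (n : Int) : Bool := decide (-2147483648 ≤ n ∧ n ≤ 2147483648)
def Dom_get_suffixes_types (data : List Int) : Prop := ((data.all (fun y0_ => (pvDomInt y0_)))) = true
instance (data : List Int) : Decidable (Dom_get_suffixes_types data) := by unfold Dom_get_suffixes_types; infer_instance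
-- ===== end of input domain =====

-- B classifies suffixes by a forward pass over maximal runs of equal characters
-- instead of A's backward per-index propagation scan (alternative decomposition, same cost).


-- ===== PORT A =====
-- literal port of A's backward scan; data[offset] / data[offset+1] / suffixes_types[offset+1]
-- are in-range Python indexings, ported with pyGetD (the default is never reached).
def get_suffixes_types (data : List Int) : List String :=
  let N : Int := data.length
  let suffixes_types : List String := List.replicate (data.length + 1) "S"
  if N = 0 then suffixes_types
  else
    -- suffixes_types[-2] = L : index -2 of a list of length N+1 resolves to N-1
    let suffixes_types := suffixes_types.set (data.length - 1) "L"
    (PySem.List.pyRange (N - 2) (-1) (-1)).foldl (fun st offset =>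
      let a := PySem.List.pyGetD data offset 0
      let b := PySem.List.pyGetD data (offset + 1) 0
      if a > b then st.set offset.toNat "L"
      else if a = b then st.set offset.toNat (PySem.List.pyGetD st (offset + 1) "S")
      else st) suffixes_types

-- ===== PORT B =====
-- run length: number of leading elements of the rest equal to c (inner while loop of Source B)
def pvRunLen (c : Int) : List Int → Nat
  | [] => 0
  | x :: xs => if x = c then pvRunLen c xs + 1 else 0

theorem pvRunLen_le (c : Int) (xs : List Int) : pvRunLen c xs ≤ xs.length := by
  induction xs with
  | nil => simp [pvRunLen]
  | cons x xs ih =>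
    simp only [pvRunLen]
    split
    · simp only [List.length_cons]; omega
    · simp

-- outer while loop of Source B: consume one maximal run per step
def pvRuns (data : List Int) : List String :=
  match data with
  | [] => []
  | c :: rest =>
    let r := pvRunLen c rest
    let tail := rest.drop r
    let t : String := match tail with
      | [] => "L"
      | d :: _ => if c < d then "S" else "L"
    List.replicate (r + 1) t ++ pvRuns tail
termination_by data.length
decreasing_by
  simp only [List.length_drop, List.length_cons]
  have := pvRunLen_le c rest
  omega

def get_suffixes_types_alt (data : List Int) : List String :=
  pvRuns data ++ ["S"]

-- ===== PRECONDITION & SPEC =====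
def Spec_get_suffixes_types (data : List Int) (out : List String) : Prop := out = get_suffixes_types_alt data
instance (data : List Int) (out : List String) : Decidable (Spec_get_suffixes_types data out) := by unfold Spec_get_suffixes_types; infer_instance

-- ===== CLAIM (what is proved, stated in full; the proofs are below) =====
def Claim_equal_get_suffixes_types : Prop := ∀ (data : List Int), Dom_get_suffixes_types data → Spec_get_suffixes_types data (get_suffixes_types data)

-- ===== LEMMAS AND PROOFS =====

-- reference recursion: sfx data = list of suffix types of data (plus trailing "S" for the empty suffix)
def pvSfx : List Int → List String
  | [] => ["S"]
  | [_] => ["L", "S"]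
  | x :: y :: rest =>
    (if x > y then "L"
     else if x = y then (pvSfx (y :: rest)).headD "S"
     else "S") :: pvSfx (y :: rest)

theorem pvSfx_ne_nil (l : List Int) : pvSfx l ≠ [] := by
  match l with
  | [] => simp [pvSfx]
  | [_] => simp [pvSfx]
  | _ :: _ :: _ => simp [pvSfx]

theorem pvSfx_length (l : List Int) : (pvSfx l).length = l.length + 1 := by
  match l with
  | [] => simp [pvSfx]
  | [_] => simp [pvSfx]
  | x :: y :: rest => simp [pvSfx, pvSfx_length (y :: rest)]

-- B equals the reference: a maximal run gets the type determined by the next differing character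
theorem pvRuns_eq_sfx (data : List Int) :
    pvRuns data ++ ["S"] = pvSfx data := by
  match data with
  | [] => simp [pvRuns, pvSfx]
  | c :: rest =>
    rw [pvRuns]
    have key : ∀ (rest : List Int) (c : Int),
        pvSfx (c :: rest) =
          List.replicate (pvRunLen c rest + 1)
            (match rest.drop (pvRunLen c rest) with
             | [] => "L"
             | d :: _ => if c < d then "S" else "L") ++ pvSfx (rest.drop (pvRunLen c rest)) := by
      intro rest
      induction rest with
      | nil => intro c; simp [pvSfx, pvRunLen]
      | cons d rest' ih =>
        intro c
        by_cases hcd : c = d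
        · subst hcd
          have hr : pvRunLen c (c :: rest') = pvRunLen c rest' + 1 := by simp [pvRunLen]
          rw [hr]
          have ihd := ih c
          show pvSfx (c :: c :: rest') = _
          rw [pvSfx]
          simp only [lt_irrefl, ite_true, ite_false]
          rw [ihd]
          have hhead : (List.replicate (pvRunLen c rest' + 1)
              (match rest'.drop (pvRunLen c rest') with
               | [] => "L"
               | d :: _ => if c < d then "S" else "L") ++ pvSfx (rest'.drop (pvRunLen c rest'))).headD "S"
              = (match rest'.drop (pvRunLen c rest') with
               | [] => "L"
               | d :: _ => if c < d then "S" else "L") := by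
            simp [List.replicate_succ]
          rw [hhead]
          simp [List.replicate_succ, List.drop]
        · have hr : pvRunLen c (d :: rest') = 0 := by simp [pvRunLen, Ne.symm hcd]
          rw [hr]
          show pvSfx (c :: d :: rest') = _
          rw [pvSfx]
          simp only [List.drop, List.replicate_succ, List.replicate_zero, List.nil_append,
            List.cons_append]
          congr 1
          rcases lt_trichotomy c d with h | h | h
          · simp [not_lt.mpr (le_of_lt h), h, hcd]
          · exact absurd h hcd
          · simp [h, not_lt.mpr (le_of_lt h)]
    rw [key rest c, List.append_assoc]
    congr 1
    exact pvRuns_eq_sfx (rest.drop (pvRunLen c rest))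
termination_by data.length
decreasing_by
  simp only [List.length_drop, List.length_cons]
  have := pvRunLen_le c rest
  omega

-- setting index k in (replicate (k+1) s ++ t)
theorem pvSet_replicate {α : Type} (k : Nat) (s v : α) (t : List α) :
    (List.replicate (k + 1) s ++ t).set k v = List.replicate k s ++ v :: t := by
  induction k with
  | zero => simp [List.replicate_succ]
  | succ n ih => rw [List.replicate_succ, List.cons_append, List.set_cons_succ, ih,
      List.replicate_succ, List.cons_append]

-- A's loop invariant: after processing offsets N-2 … k, the state is replicate k "S" ++ pvSfx (drop k data)
theorem pvLoop_inv (data : List Int) (k : Nat) (hk : k + 1 ≤ data.length) :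
    (PySem.List.pyRange ((k : Int) - 1) (-1) (-1)).foldl (fun st offset =>
      let a := PySem.List.pyGetD data offset 0
      let b := PySem.List.pyGetD data (offset + 1) 0
      if a > b then st.set offset.toNat "L"
      else if a = b then st.set offset.toNat (PySem.List.pyGetD st (offset + 1) "S")
      else st) (List.replicate k "S" ++ pvSfx (data.drop k)) = pvSfx data := by
  induction k with
  | zero =>
    rw [PySem.List.pyRange_neg_one_eq_nil (by omega)]
    simp
  | succ n ih =>
    have hn2 : n + 2 ≤ data.length := by omega
    obtain ⟨x, tl, hx⟩ : ∃ x tl, data.drop n = x :: tl := by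
      cases h : data.drop n with
      | nil =>
        exfalso
        have hl : (data.drop n).length = data.length - n := by simp
        rw [h] at hl; simp at hl; omega
      | cons a b => exact ⟨a, b, rfl⟩
    obtain ⟨y, tl', hy⟩ : ∃ y tl', tl = y :: tl' := by
      cases h : tl with
      | nil =>
        exfalso
        have hl : (data.drop n).length = data.length - n := by simp
        rw [hx, h] at hl; simp at hl; omega
      | cons a b => exact ⟨a, b, rfl⟩
    subst hy
    have hdn1 : data.drop (n + 1) = y :: tl' := by
      rw [← List.tail_drop, hx]; rfl
    have hgx : data[n]? = some x := by rw [← List.head?_drop, hx]; rfl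
    have hgy : data[n + 1]? = some y := by rw [← List.head?_drop, hdn1]; rfl
    have hrange : PySem.List.pyRange (((n : Nat) + 1 : Int) - 1) (-1) (-1)
        = (n : Int) :: PySem.List.pyRange ((n : Int) - 1) (-1) (-1) := by
      have h1 : ((n : Nat) + 1 : Int) - 1 = (n : Int) := by ring
      rw [h1, PySem.List.pyRange_neg_one_cons (by omega)]
    have hcast : ((n : Nat) + 1 : Int) = (((n + 1 : Nat) : Int)) := by push_cast; ring
    rw [hcast] at hrange
    rw [hrange, List.foldl_cons]
    have ha : PySem.List.pyGetD data ((n : Nat) : Int) 0 = x := by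
      simp [PySem.List.pyGetD, hgx]
    have hb : PySem.List.pyGetD data (((n : Nat) : Int) + 1) 0 = y := by
      have h1 : ((n : Nat) : Int) + 1 = (((n + 1 : Nat) : Int)) := by push_cast; ring
      simp only [PySem.List.pyGetD]
      rw [h1, PySem.List.pyGet?_natCast, hgy]
      rfl
    rw [hdn1]
    have hdropn : data.drop n = x :: y :: tl' := hx
    have hbody :
        (let a := PySem.List.pyGetD data ((n : Nat) : Int) 0
         let b := PySem.List.pyGetD data (((n : Nat) : Int) + 1) 0
         if a > b then (List.replicate (n + 1) "S" ++ pvSfx (y :: tl')).set (((n : Nat) : Int)).toNat "L"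
         else if a = b then
           (List.replicate (n + 1) "S" ++ pvSfx (y :: tl')).set (((n : Nat) : Int)).toNat
             (PySem.List.pyGetD (List.replicate (n + 1) "S" ++ pvSfx (y :: tl')) (((n : Nat) : Int) + 1) "S")
         else List.replicate (n + 1) "S" ++ pvSfx (y :: tl'))
        = List.replicate n "S" ++ pvSfx (data.drop n) := by
      simp only [ha, hb, Int.toNat_natCast]
      rw [hdropn, pvSfx]
      by_cases hxy : x > y
      · rw [if_pos hxy, pvSet_replicate]
        have : (if x > y then "L" else if x = y then (pvSfx (y :: tl')).headD "S" else "S") = "L" := by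
          rw [if_pos hxy]
        rw [this]
      · rw [if_neg hxy]
        by_cases heq : x = y
        · rw [if_pos heq]
          have hget : PySem.List.pyGetD (List.replicate (n + 1) "S" ++ pvSfx (y :: tl'))
              (((n : Nat) : Int) + 1) "S" = (pvSfx (y :: tl')).headD "S" := by
            have h1 : ((n : Nat) : Int) + 1 = (((n + 1 : Nat) : Int)) := by push_cast; ring
            simp only [PySem.List.pyGetD]
            rw [h1, PySem.List.pyGet?_natCast, List.getElem?_append_right (by simp)]
            simp only [List.length_replicate, Nat.sub_self]
            cases h : pvSfx (y :: tl') with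
            | nil => exact absurd h (pvSfx_ne_nil _)
            | cons a b => simp
          rw [hget, pvSet_replicate]
          have : (if x > y then "L" else if x = y then (pvSfx (y :: tl')).headD "S" else "S")
              = (pvSfx (y :: tl')).headD "S" := by
            rw [if_neg hxy, if_pos heq]
          rw [this]
        · rw [if_neg heq]
          have : (if x > y then "L" else if x = y then (pvSfx (y :: tl')).headD "S" else "S") = "S" := by
            rw [if_neg hxy, if_neg heq]
          rw [this, List.replicate_succ', List.append_assoc]
          rfl
    rw [hbody]
    exact ih (by omega)

-- ===== VERDICT (by name: the statement is the Claim_ definition above) =====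
theorem get_suffixes_types_spec : Claim_equal_get_suffixes_types := by
  unfold Claim_equal_get_suffixes_types
  intro data _
  unfold Spec_get_suffixes_types get_suffixes_types get_suffixes_types_alt
  rw [pvRuns_eq_sfx]
  rcases List.eq_nil_or_concat data with hnil | ⟨ys, z, hconcat⟩
  · subst hnil; simp [pvSfx]
  · rw [List.concat_eq_append] at hconcat
    subst hconcat
    have hlen : (ys ++ [z]).length = ys.length + 1 := by simp
    rw [hlen]
    have hne : ((ys.length + 1 : Nat) : Int) ≠ 0 := by push_cast; omega
    rw [if_neg hne]
    have hinit : (List.replicate (ys.length + 1 + 1) "S").set (ys.length + 1 - 1) "L"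
        = List.replicate ys.length "S" ++ pvSfx ((ys ++ [z]).drop ys.length) := by
      have hdrop : (ys ++ [z]).drop ys.length = [z] := by
        simp
      rw [hdrop]
      have h1 : ys.length + 1 - 1 = ys.length := by omega
      have h2 : List.replicate (ys.length + 1 + 1) "S"
          = List.replicate (ys.length + 1) "S" ++ ["S"] := by
        rw [← List.replicate_succ']
      rw [h1, h2, pvSet_replicate]
      simp [pvSfx]
    rw [hinit]
    have harg : ((ys.length + 1 : Nat) : Int) - 2 = ((ys.length : Nat) : Int) - 1 := by
      push_cast; ring
    rw [harg]
    exact pvLoop_inv (ys ++ [z]) ys.length (by simp)
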